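-- pv_equiv track=rewrite | github.com/mateogon/tibia_12_bot | tools/evaluate_unwalkable_samples.py | _transform_tiles
-- ===== SOURCE A (Python) =====
-- from typing import Dict, Iterable, List, Optional, Sequence, Set, Tuple
--
-- Tile = Tuple[int, int]
--
-- def _iter_components_8(tiles: Set[Tile]) -> List[List[Tile]]:
--     rem = set(tiles)
--     comps: List[List[Tile]] = []
--     dirs = [(-1, -1), (-1, 0), (-1, 1), (0, -1), (0, 1), (1, -1), (1, 0), (1, 1)]
--     while rem:
--         start = next(iter(rem))
--         stack = [start]
--         rem.remove(start)
--         comp = [start]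
--         while stack:
--             r, c = stack.pop()
--             for dr, dc in dirs:
--                 n = (r + dr, c + dc)
--                 if n in rem:
--                     rem.remove(n)
--                     stack.append(n)
--                     comp.append(n)
--         comps.append(comp)
--     return comps
--
-- def _transform_tiles(tiles: Set[Tile], mode: str, dr: int = 0, dc: int = 0) -> Set[Tile]:
--     out = {(r + int(dr), c + int(dc)) for (r, c) in tiles}
--     out = {(r, c) for (r, c) in out if 0 <= r < 11 and 0 <= c < 15}
--     if mode == "raw":
--         return out
--     if mode == "comp_ne":
--         keep: Set[Tile] = set()
--         for comp in _iter_components_8(out):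
--             # Keep one representative biased to north-east; useful for
--             # zoom spill where true yellow often is the top-right tile.
--             best = min(comp, key=lambda rc: (rc[0], -rc[1]))
--             keep.add(best)
--         return keep
--     return out
-- ===== SOURCE B (Python) =====
-- def _transform_tiles(tiles, mode, dr=0, dc=0):
--     out = {(r + int(dr), c + int(dc)) for (r, c) in tiles}
--     out = {(r, c) for (r, c) in out if 0 <= r < 11 and 0 <= c < 15}
--     if mode != "comp_ne":
--         return out
--     keep = set()
--     for t in out:
--         # grow t's whole 8-connected component by frontier expansion
--         comp = {t}
--         frontier = {t}
--         while frontier: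
--             grown = {(r + i, c + j) for (r, c) in frontier
--                      for i in (-1, 0, 1) for j in (-1, 0, 1)}
--             frontier = (grown & out) - comp
--             comp |= frontier
--         keep.add(min(comp, key=lambda rc: (rc[0], -rc[1])))
--     return keep
-- ===== Notes on version B (the rewrite author's own statement) =====
-- stated objective: alternative
-- what changed: Replaced the global DFS component extraction (mutable remaining-set + explicit stack, popping one component at a time) by a per-tile frontier-expansion closure: for every tile of the filtered set its whole 8-connected component is grown as a set fixpoint and the component's NE-min representative is added to the keep set, deduplication happening through the set itself.
import Mathlib
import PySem

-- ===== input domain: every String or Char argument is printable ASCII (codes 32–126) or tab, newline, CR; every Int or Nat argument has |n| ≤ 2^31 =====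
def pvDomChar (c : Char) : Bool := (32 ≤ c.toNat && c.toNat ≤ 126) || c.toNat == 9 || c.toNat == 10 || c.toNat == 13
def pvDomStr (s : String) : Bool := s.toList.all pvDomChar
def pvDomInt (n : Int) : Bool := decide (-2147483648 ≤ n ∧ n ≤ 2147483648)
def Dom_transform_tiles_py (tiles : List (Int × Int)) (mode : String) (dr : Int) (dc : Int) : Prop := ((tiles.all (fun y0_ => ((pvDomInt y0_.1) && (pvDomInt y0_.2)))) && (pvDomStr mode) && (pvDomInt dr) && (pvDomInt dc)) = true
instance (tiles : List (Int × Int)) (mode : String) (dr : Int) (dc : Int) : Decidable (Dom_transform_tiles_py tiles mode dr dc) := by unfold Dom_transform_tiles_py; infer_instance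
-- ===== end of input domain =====

-- ===== PORT A =====
-- B changes the component search: A extracts components once by DFS over a shrinking
-- remaining set; B regrows each tile's component by frontier expansion (no speed claim).
-- A-side helpers (literal transliteration of _iter_components_8 and _transform_tiles)

def pvDirs : List (Int × Int) :=
  [(-1, -1), (-1, 0), (-1, 1), (0, -1), (0, 1), (1, -1), (1, 0), (1, 1)]

def pvInB (t : Int × Int) : Bool :=
  decide (0 ≤ t.1) && decide (t.1 < 11) && decide (0 ≤ t.2) && decide (t.2 < 15)

-- out = {(r+dr, c+dc) …}; out = {(r,c) for … if bounds}  (shared first two lines of both sources)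
def pvOut (tiles : List (Int × Int)) (dr dc : Int) : List (Int × Int) :=
  PySem.Set.ofList
    ((PySem.Set.ofList (tiles.map (fun t => (t.1 + dr, t.2 + dc)))).filter pvInB)

-- one neighbour check of the inner 'for dr, dc in dirs' body; state = (rem, stack, comp)
def pvDfsStep (t : Int × Int)
    (s : List (Int × Int) × List (Int × Int) × List (Int × Int)) (d : Int × Int) :
    List (Int × Int) × List (Int × Int) × List (Int × Int) :=
  let n := (t.1 + d.1, t.2 + d.2)
  if PySem.Set.contains s.1 n then (s.1.erase n, s.2.1 ++ [n], s.2.2 ++ [n]) else s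

theorem pvFilterMono {p q : (Int × Int) → Bool} :
    ∀ (l : List (Int × Int)), (∀ a ∈ l, q a = true → p a = true) →
      (l.filter q).length ≤ (l.filter p).length := by
  intro l
  induction l with
  | nil => simp
  | cons x xs ih =>
    intro h
    have ih' := ih (fun a ha => h a (List.mem_cons_of_mem _ ha))
    by_cases hq : q x = true
    · simp [hq, h x List.mem_cons_self hq]; omega
    · simp only [Bool.not_eq_true] at hq
      by_cases hp : p x = true <;> simp [hp, hq] <;> omega

theorem pvDfsStep_len (t : Int × Int) :
    ∀ (ds : List (Int × Int)) (s : List (Int × Int) × List (Int × Int) × List (Int × Int)),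
      ((ds.foldl (pvDfsStep t) s).1.length + (ds.foldl (pvDfsStep t) s).2.1.length)
        ≤ s.1.length + s.2.1.length := by
  intro ds
  induction ds with
  | nil => intro s; simp
  | cons d ds ih =>
    intro s
    simp only [List.foldl_cons]
    refine le_trans (ih _) ?_
    simp only [pvDfsStep]
    split
    · next h =>
      have hm : (t.1 + d.1, t.2 + d.2) ∈ s.1 := by
        simpa [PySem.Set.contains] using h
      have hpos := List.length_pos_of_mem hm
      simp [List.length_erase_of_mem hm]
      omega
    · exact le_rfl

theorem pvDfsStep_rem_le (t : Int × Int) :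
    ∀ (ds : List (Int × Int)) (s : List (Int × Int) × List (Int × Int) × List (Int × Int)),
      (ds.foldl (pvDfsStep t) s).1.length ≤ s.1.length := by
  intro ds
  induction ds with
  | nil => intro s; simp
  | cons d ds ih =>
    intro s
    simp only [List.foldl_cons]
    refine le_trans (ih _) ?_
    simp only [pvDfsStep]
    split
    · exact List.length_erase_le
    · exact le_rfl

theorem pvDfs_dec (rem stack comp : List (Int × Int)) (h : ¬ stack = []) :
    (pvDirs.foldl (pvDfsStep (stack.getLast h)) (rem, stack.dropLast, comp)).1.length +
      (pvDirs.foldl (pvDfsStep (stack.getLast h)) (rem, stack.dropLast, comp)).2.1.length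
      < rem.length + stack.length := by
  have hl := pvDfsStep_len (stack.getLast h) pvDirs (rem, stack.dropLast, comp)
  simp only at hl
  have hd : stack.dropLast.length = stack.length - 1 := by simp
  have hpos : 0 < stack.length := List.length_pos_of_ne_nil h
  omega

-- the inner 'while stack:' loop; returns (comp, rem)
def pvDfs (rem stack comp : List (Int × Int)) : List (Int × Int) × List (Int × Int) :=
  if h : stack = [] then (comp, rem)
  else
    -- r, c = stack.pop()  (pops the LAST element)
    let t := stack.getLast h
    let s' := pvDirs.foldl (pvDfsStep t) (rem, stack.dropLast, comp)
    pvDfs s'.1 s'.2.1 s'.2.2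
termination_by rem.length + stack.length
decreasing_by
  exact pvDfs_dec rem stack comp h

theorem pvDfs_rem_le :
    ∀ (rem stack comp : List (Int × Int)), (pvDfs rem stack comp).2.length ≤ rem.length := by
  intro rem stack comp
  fun_induction pvDfs rem stack comp with
  | case1 rem comp => simp
  | case2 rem stack comp h t s' ih =>
    refine le_trans ih ?_
    have hl := pvDfsStep_rem_le (stack.getLast h) pvDirs (rem, stack.dropLast, comp)
    simpa using hl

theorem pvComps_dec (start : Int × Int) (rest : List (Int × Int)) :
    (pvDfs rest [start] [start]).2.length < (start :: rest).length := by
  have := pvDfs_rem_le rest [start] [start]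
  simp only [List.length_cons]
  omega

-- 'while rem:' of _iter_components_8 (start = next(iter(rem)) = first element)
def pvComps (rem : List (Int × Int)) : List (List (Int × Int)) :=
  match rem with
  | [] => []
  | start :: rest =>
    let p := pvDfs rest [start] [start]
    p.1 :: pvComps p.2
termination_by rem.length
decreasing_by
  exact pvComps_dec start rest

-- keep.add(min(comp, key=lambda rc: (rc[0], -rc[1])))  (comp is never empty)
def pvAddMin (keep : List (Int × Int)) (comp : List (Int × Int)) : List (Int × Int) :=
  match PySem.List.min2? comp (fun rc => rc.1) (fun rc => -rc.2) with
  | some b => PySem.Set.add keep b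
  | none => keep

def transform_tiles_py (tiles : List (Int × Int)) (mode : String) (dr : Int) (dc : Int) :
    List (Int × Int) :=
  let out := pvOut tiles dr dc
  if mode == "raw" then out
  else if mode == "comp_ne" then (pvComps out).foldl pvAddMin []
  else out

-- ===== PORT B =====
-- B-side helpers (literal transliteration of Source B)

def pvOffs : List Int := [-1, 0, 1]

-- grown = {(r+i, c+j) for (r,c) in frontier for i in (-1,0,1) for j in (-1,0,1)}
def pvGrown (frontier : List (Int × Int)) : List (Int × Int) :=
  PySem.Set.ofList
    (frontier.flatMap (fun t => pvOffs.flatMap (fun i => pvOffs.map (fun j => (t.1 + i, t.2 + j)))))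

theorem pvFilter_len_lt {p q : (Int × Int) → Bool} {l : List (Int × Int)}
    (himp : ∀ a, q a = true → p a = true) {a : Int × Int} (ha : a ∈ l)
    (hpa : p a = true) (hqa : q a = false) :
    (l.filter q).length < (l.filter p).length := by
  induction l with
  | nil => cases ha
  | cons x xs ih =>
    have hsub := pvFilterMono xs (fun b _ hq => himp b hq)
    rcases List.mem_cons.1 ha with rfl | hx
    · simp [hpa, hqa]
      omega
    · have := ih hx
      simp only [List.filter_cons]
      by_cases hq : q x = true
      · simp [hq, himp x hq]; omega
      · simp only [Bool.not_eq_true] at hq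
        by_cases hp : p x = true <;> simp [hp, hq] <;> omega

theorem pvClosure_dec (out comp frontier : List (Int × Int))
    (hne : ¬ frontier.isEmpty = true) :
    (PySem.Set.diff out
        (PySem.Set.union comp
          (PySem.Set.diff (PySem.Set.inter (pvGrown frontier) out) comp))).length * 2 +
      (if (PySem.Set.diff (PySem.Set.inter (pvGrown frontier) out) comp).isEmpty then 0 else 1)
      < (PySem.Set.diff out comp).length * 2 + (if frontier.isEmpty then 0 else 1) := by
  simp only [hne]
  by_cases hf : (PySem.Set.diff (PySem.Set.inter (pvGrown frontier) out) comp).isEmpty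
  · -- frontier' empty: comp unchanged
    have : PySem.Set.diff (PySem.Set.inter (pvGrown frontier) out) comp = [] :=
      List.isEmpty_iff.1 hf
    simp [this, PySem.Set.union, PySem.Set.update]
  · simp only [hf]
    have hlt :
        (PySem.Set.diff out
            (PySem.Set.union comp
              (PySem.Set.diff (PySem.Set.inter (pvGrown frontier) out) comp))).length
          < (PySem.Set.diff out comp).length := by
      set f' := PySem.Set.diff (PySem.Set.inter (pvGrown frontier) out) comp with hf'
      obtain ⟨a, ha⟩ : ∃ a, a ∈ f' := by
        rcases f' with _ | ⟨a, _⟩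
        · simp at hf
        · exact ⟨a, List.mem_cons_self⟩
      have haout : a ∈ out := by
        have := (PySem.Set.mem_diff _ _ a).1 ha
        exact ((PySem.Set.mem_inter _ _ a).1 this.1).2
      have hanc : a ∉ comp := ((PySem.Set.mem_diff _ _ a).1 ha).2
      have himp : ∀ b, (!PySem.Set.contains (PySem.Set.union comp f') b) = true →
          (!PySem.Set.contains comp b) = true := by
        intro b hb
        simp only [Bool.not_eq_true', PySem.Set.contains] at hb ⊢
        by_contra hcb
        simp only [Bool.not_eq_false] at hcb
        have hbmem : b ∈ comp := by simpa using hcb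
        have : b ∉ PySem.Set.union comp f' := by simpa using hb
        exact this ((PySem.Set.mem_union _ _ b).2 (Or.inl hbmem))
      have hqa : (!PySem.Set.contains (PySem.Set.union comp f') a) = false := by
        simp only [PySem.Set.contains]
        simpa using fun _ : a ∉ comp => ha
      exact pvFilter_len_lt himp haout (by simpa [PySem.Set.contains] using hanc) hqa
    omega

-- 'while frontier:' of Source B
def pvClosure (out comp frontier : List (Int × Int)) : List (Int × Int) :=
  if frontier.isEmpty then comp
  else
    let f' := PySem.Set.diff (PySem.Set.inter (pvGrown frontier) out) comp
    pvClosure out (PySem.Set.union comp f') f'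
termination_by ((PySem.Set.diff out comp).length) * 2 + (if frontier.isEmpty then 0 else 1)
decreasing_by
  rename_i hne
  exact pvClosure_dec out comp frontier hne

def transform_tiles_py_alt (tiles : List (Int × Int)) (mode : String) (dr : Int) (dc : Int) :
    List (Int × Int) :=
  let out := pvOut tiles dr dc
  if mode == "comp_ne" then
    out.foldl (fun keep t => pvAddMin keep (pvClosure out [t] [t])) []
  else out

-- ===== PRECONDITION & SPEC =====
def Spec_transform_tiles_py (tiles : List (Int × Int)) (mode : String) (dr : Int) (dc : Int) (out : List (Int × Int)) : Prop := out = transform_tiles_py_alt tiles mode dr dc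
instance (tiles : List (Int × Int)) (mode : String) (dr : Int) (dc : Int) (out : List (Int × Int)) : Decidable (Spec_transform_tiles_py tiles mode dr dc out) := by unfold Spec_transform_tiles_py; infer_instance

-- ===== CLAIM (what is proved, stated in full; the proofs are below) =====
def Claim_equal_transform_tiles_py : Prop := ∀ (tiles : List (Int × Int)) (mode : String) (dr : Int) (dc : Int), Dom_transform_tiles_py tiles mode dr dc → Spec_transform_tiles_py tiles mode dr dc (transform_tiles_py tiles mode dr dc)

-- ===== LEMMAS AND PROOFS =====

-- 8-neighbour adjacency and connectivity inside a tile list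
def PvAdj (a b : Int × Int) : Prop :=
  (¬ (a.1 = b.1 ∧ a.2 = b.2)) ∧ (a.1 - b.1).natAbs ≤ 1 ∧ (a.2 - b.2).natAbs ≤ 1

def PvStep (U : List (Int × Int)) (a b : Int × Int) : Prop := b ∈ U ∧ PvAdj a b

def PvConn (U : List (Int × Int)) (a b : Int × Int) : Prop :=
  Relation.ReflTransGen (PvStep U) a b

theorem pvAdj_symm {a b : Int × Int} (h : PvAdj a b) : PvAdj b a := by
  unfold PvAdj at h ⊢; omega

theorem pvConn_trans {U : List (Int × Int)} {a b c : Int × Int}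
    (h1 : PvConn U a b) (h2 : PvConn U b c) : PvConn U a c :=
  Relation.ReflTransGen.trans h1 h2

theorem pvConn_mem {U : List (Int × Int)} {a b : Int × Int} (h : PvConn U a b) :
    b = a ∨ b ∈ U := by
  induction h with
  | refl => exact Or.inl rfl
  | tail _ h2 _ => exact Or.inr h2.1

theorem pvConn_symm {U : List (Int × Int)} {a b : Int × Int} (ha : a ∈ U)
    (h : PvConn U a b) : PvConn U b a := by
  induction h with
  | refl => exact Relation.ReflTransGen.refl
  | @tail c d h1 h2 ih =>
    have hc : c ∈ U := by
      rcases pvConn_mem h1 with rfl | hm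
      · exact ha
      · exact hm
    exact Relation.ReflTransGen.head ⟨hc, pvAdj_symm h2.2⟩ ih

theorem pvClosed_conn {U C : List (Int × Int)} {s x : Int × Int}
    (hclosed : ∀ x ∈ C, ∀ y ∈ U, PvAdj x y → y ∈ C) (hs : s ∈ C)
    (h : PvConn U s x) : x ∈ C := by
  induction h with
  | refl => exact hs
  | tail _ h2 ih => exact hclosed _ ih _ h2.1 h2.2

theorem pvMem_dirs {d : Int × Int} :
    d ∈ pvDirs ↔ (¬ (d.1 = 0 ∧ d.2 = 0)) ∧ d.1.natAbs ≤ 1 ∧ d.2.natAbs ≤ 1 := by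
  rcases d with ⟨i, j⟩
  simp only [pvDirs, List.mem_cons, List.not_mem_nil, or_false, Prod.mk.injEq]
  omega

theorem pvAdj_iff_dir (t n : Int × Int) :
    PvAdj t n ↔ ∃ d ∈ pvDirs, n = (t.1 + d.1, t.2 + d.2) := by
  constructor
  · intro h
    refine ⟨(n.1 - t.1, n.2 - t.2), ?_, ?_⟩
    · rw [pvMem_dirs]; unfold PvAdj at h; simp; omega
    · simp
  · rintro ⟨d, hd, rfl⟩
    rw [pvMem_dirs] at hd
    unfold PvAdj
    simp; omega

theorem pvMem_offs {i : Int} : i ∈ pvOffs ↔ i.natAbs ≤ 1 := by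
  simp only [pvOffs, List.mem_cons, List.not_mem_nil, or_false]; omega

theorem pvMem_grown {frontier : List (Int × Int)} {n : Int × Int} :
    n ∈ pvGrown frontier ↔ ∃ x ∈ frontier, (n = x ∨ PvAdj x n) := by
  unfold pvGrown
  rw [PySem.Set.mem_ofList]
  simp only [List.mem_flatMap, List.mem_map]
  constructor
  · rintro ⟨t, ht, i, hi, j, hj, rfl⟩
    rw [pvMem_offs] at hi hj
    refine ⟨t, ht, ?_⟩
    by_cases h0 : i = 0 ∧ j = 0
    · left; simp [h0.1, h0.2]
    · right; unfold PvAdj; simp; omega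
  · rintro ⟨x, hx, h | hadj⟩
    · exact ⟨x, hx, 0, by simp [pvOffs], 0, by simp [pvOffs], by simp [h]⟩
    · refine ⟨x, hx, n.1 - x.1, ?_, n.2 - x.2, ?_, by simp⟩
      · rw [pvMem_offs]; unfold PvAdj at hadj; omega
      · rw [pvMem_offs]; unfold PvAdj at hadj; omega

-- ---------- lexicographic NE-minimum (min with key (r, -c)) ----------

def PvLexLt (x m : Int × Int) : Prop := x.1 < m.1 ∨ (¬ m.1 < x.1 ∧ m.2 < x.2)

theorem pvLexLt_bool (x m : Int × Int) :
    (decide (x.1 < m.1) || (!decide (m.1 < x.1) && decide (-x.2 < -m.2))) = true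
      ↔ PvLexLt x m := by
  unfold PvLexLt
  simp

theorem pvMin2_cons (xs : List (Int × Int)) (m : Int × Int) :
    ∃ m', PySem.List.min2? (m :: xs) (fun rc => rc.1) (fun rc => -rc.2) = some m' ∧
      (m' = m ∨ m' ∈ xs) ∧ ¬ PvLexLt m m' ∧ ∀ y ∈ xs, ¬ PvLexLt y m' := by
  induction xs generalizing m with
  | nil =>
    exact ⟨m, by simp [PySem.List.min2?], Or.inl rfl, by unfold PvLexLt; omega, by simp⟩
  | cons d ds ih =>
    have hstep :
        PySem.List.min2? (m :: d :: ds) (fun rc => rc.1) (fun rc => -rc.2)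
          = PySem.List.min2? ((if (decide (d.1 < m.1) ||
              (!decide (m.1 < d.1) && decide (-d.2 < -m.2))) = true then d else m) :: ds)
              (fun rc => rc.1) (fun rc => -rc.2) := by
      simp only [PySem.List.min2?, List.foldl_cons]
      split <;> rfl
    by_cases hc : PvLexLt d m
    · have hb : (decide (d.1 < m.1) || (!decide (m.1 < d.1) && decide (-d.2 < -m.2))) = true :=
        (pvLexLt_bool d m).2 hc
      obtain ⟨m', hmin, hmem, hdm', hall⟩ := ih d
      refine ⟨m', by rw [hstep, if_pos hb]; exact hmin, ?_, ?_, ?_⟩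
      · rcases hmem with rfl | hm
        · exact Or.inr List.mem_cons_self
        · exact Or.inr (List.mem_cons_of_mem _ hm)
      · unfold PvLexLt at hc hdm' ⊢; omega
      · intro y hy
        rcases List.mem_cons.1 hy with rfl | hy'
        · exact hdm'
        · exact hall y hy'
    · have hb : ¬ ((decide (d.1 < m.1) || (!decide (m.1 < d.1) && decide (-d.2 < -m.2))) = true) := by
        rw [pvLexLt_bool]; exact hc
      obtain ⟨m', hmin, hmem, hmm', hall⟩ := ih m
      refine ⟨m', by rw [hstep, if_neg hb]; exact hmin, ?_, hmm', ?_⟩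
      · rcases hmem with rfl | hm
        · exact Or.inl rfl
        · exact Or.inr (List.mem_cons_of_mem _ hm)
      · intro y hy
        rcases List.mem_cons.1 hy with rfl | hy'
        · unfold PvLexLt at hc hmm' ⊢; omega
        · exact hall y hy'

theorem pvMin2_spec (xs : List (Int × Int)) (hx : xs ≠ []) :
    ∃ m, PySem.List.min2? xs (fun rc => rc.1) (fun rc => -rc.2) = some m ∧
      m ∈ xs ∧ ∀ y ∈ xs, ¬ PvLexLt y m := by
  rcases xs with _ | ⟨x, t⟩
  · exact absurd rfl hx
  · obtain ⟨m, hmin, hmem, hxm, hall⟩ := pvMin2_cons t x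
    refine ⟨m, hmin, ?_, ?_⟩
    · rcases hmem with rfl | hm
      · exact List.mem_cons_self
      · exact List.mem_cons_of_mem _ hm
    · intro y hy
      rcases List.mem_cons.1 hy with rfl | hy'
      · exact hxm
      · exact hall y hy' 

theorem pvMin2_congr {A B : List (Int × Int)} (hA : A ≠ [])
    (h : ∀ x, x ∈ A ↔ x ∈ B) :
    PySem.List.min2? A (fun rc => rc.1) (fun rc => -rc.2)
      = PySem.List.min2? B (fun rc => rc.1) (fun rc => -rc.2) := by
  have hB : B ≠ [] := by
    rcases A with _ | ⟨a, A⟩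
    · exact absurd rfl hA
    · intro hB0
      have := (h a).1 List.mem_cons_self
      simp [hB0] at this
  obtain ⟨m, hm, hmA, hmin⟩ := pvMin2_spec A hA
  obtain ⟨m', hm', hmB', hmin'⟩ := pvMin2_spec B hB
  rw [hm, hm']
  have h1 : ¬ PvLexLt m' m := hmin m' ((h m').2 hmB')
  have h2 : ¬ PvLexLt m m' := hmin' m ((h m).1 hmA)
  have : m.1 = m'.1 ∧ m.2 = m'.2 := by unfold PvLexLt at h1 h2; omega
  have : m = m' := Prod.ext this.1 this.2
  rw [this]

theorem pvAddMin_mem {keep comp : List (Int × Int)} {m : Int × Int} (h : m ∈ keep) :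
    m ∈ pvAddMin keep comp := by
  unfold pvAddMin
  split
  · exact (PySem.Set.mem_add _ _ _).2 (Or.inl h)
  · exact h

theorem pvSet_add_of_mem {keep : List (Int × Int)} {m : Int × Int} (h : m ∈ keep) :
    PySem.Set.add keep m = keep := by
  unfold PySem.Set.add
  rw [if_pos]
  simpa [PySem.Set.contains] using h

-- ---------- restriction of connectivity to a class-closed remainder ----------

theorem pvConn_restrict {out R : List (Int × Int)} {s : Int × Int}
    (hRsub : ∀ x ∈ R, x ∈ out)
    (hclosed : ∀ x ∈ R, ∀ y, y ∈ out → PvConn out x y → y ∈ R)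
    (hs : s ∈ R) : ∀ y, PvConn R s y ↔ PvConn out s y := by
  intro y
  constructor
  · intro h
    induction h with
    | refl => exact Relation.ReflTransGen.refl
    | tail _ h2 ih => exact Relation.ReflTransGen.tail ih ⟨hRsub _ h2.1, h2.2⟩
  · intro h
    induction h with
    | refl => exact Relation.ReflTransGen.refl
    | @tail b c h1 h2 ih =>
      have hcR : c ∈ R := hclosed s hs c h2.1 (Relation.ReflTransGen.tail h1 h2)
      exact Relation.ReflTransGen.tail ih ⟨hcR, h2.2⟩

-- ---------- B side: the frontier-expansion closure computes the class ----------

structure PvClInv (out : List (Int × Int)) (t : Int × Int)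
    (comp frontier : List (Int × Int)) : Prop where
  nc : comp.Nodup
  ht : t ∈ comp
  hsub : ∀ x ∈ comp, x ∈ out
  hfs : ∀ x ∈ frontier, x ∈ comp
  conn : ∀ x ∈ comp, PvConn out t x
  closed : ∀ x ∈ comp, x ∉ frontier → ∀ y ∈ out, PvAdj x y → y ∈ comp

theorem pvClosure_spec {out : List (Int × Int)} {t : Int × Int} :
    ∀ comp frontier, PvClInv out t comp frontier →
      (∀ x, x ∈ pvClosure out comp frontier ↔ x ∈ out ∧ PvConn out t x) ∧
        (pvClosure out comp frontier).Nodup := by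
  intro comp frontier
  fun_induction pvClosure out comp frontier with
  | case1 comp frontier hemp =>
    intro inv
    have hfe : frontier = [] := List.isEmpty_iff.1 hemp
    subst hfe
    refine ⟨fun x => ⟨fun hx => ⟨inv.hsub x hx, inv.conn x hx⟩, fun ⟨hxo, hxc⟩ => ?_⟩, inv.nc⟩
    exact pvClosed_conn (fun z hz => inv.closed z hz (by simp)) inv.ht hxc
  | case2 comp frontier hemp f' ih =>
    intro inv
    have hf' : ∀ x, x ∈ f' ↔ (x ∈ out ∧ x ∉ comp ∧ ∃ y ∈ frontier, (x = y ∨ PvAdj y x)) := by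
      intro x
      simp only [f']
      rw [PySem.Set.mem_diff, PySem.Set.mem_inter, pvMem_grown]
      constructor
      · rintro ⟨⟨hg, ho⟩, hnc⟩
        exact ⟨ho, hnc, hg⟩
      · rintro ⟨ho, hnc, hg⟩
        exact ⟨⟨hg, ho⟩, hnc⟩
    refine ih ?_
    refine ⟨PySem.Set.nodup_union _ _ inv.nc, (PySem.Set.mem_union _ _ _).2 (Or.inl inv.ht),
      ?_, fun x hx => (PySem.Set.mem_union _ _ _).2 (Or.inr hx), ?_, ?_⟩
    · intro x hx
      rcases (PySem.Set.mem_union _ _ _).1 hx with hx | hx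
      · exact inv.hsub x hx
      · exact ((hf' x).1 hx).1
    · intro x hx
      rcases (PySem.Set.mem_union _ _ _).1 hx with hx | hx
      · exact inv.conn x hx
      · obtain ⟨ho, hnc, y, hy, hcase⟩ := (hf' x).1 hx
        rcases hcase with rfl | hadj
        · exact absurd (inv.hfs _ hy) hnc
        · exact Relation.ReflTransGen.tail (inv.conn y (inv.hfs y hy)) ⟨ho, hadj⟩
    · intro x hx hxf y hy hadj
      rcases (PySem.Set.mem_union _ _ _).1 hx with hxc | hxf'
      · by_cases hxfr : x ∈ frontier
        · -- x was on the frontier: all its neighbours land in comp ∪ f'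
          by_cases hyc : y ∈ comp
          · exact (PySem.Set.mem_union _ _ _).2 (Or.inl hyc)
          · refine (PySem.Set.mem_union _ _ _).2 (Or.inr ((hf' y).2 ⟨hy, hyc, x, hxfr, Or.inr hadj⟩))
        · exact (PySem.Set.mem_union _ _ _).2 (Or.inl (inv.closed x hxc hxfr y hy hadj))
      · exact absurd hxf' hxf

-- ---------- A side: the stack DFS computes the class and the remainder ----------

structure PvDfsPre (V : List (Int × Int)) (s t : Int × Int)
    (rem stack comp : List (Int × Int)) : Prop where
  nr : rem.Nodup
  nc : comp.Nodup
  ns : stack.Nodup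
  disj : ∀ x ∈ comp, x ∉ rem
  cover : ∀ x, x ∈ V ↔ x ∈ comp ∨ x ∈ rem
  ssub : ∀ x ∈ stack, x ∈ comp
  hs : s ∈ comp
  conn : ∀ x ∈ comp, PvConn V s x
  closed : ∀ x ∈ comp, x ∉ stack → x ≠ t → ∀ y ∈ V, PvAdj x y → y ∈ comp

theorem pvDfs_fold {V : List (Int × Int)} {s t : Int × Int} :
    ∀ (ds : List (Int × Int)) (rem stack comp : List (Int × Int)),
      (∀ d ∈ ds, d ∈ pvDirs) → PvDfsPre V s t rem stack comp → t ∈ comp → t ∉ stack →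
      PvDfsPre V s t (ds.foldl (pvDfsStep t) (rem, stack, comp)).1
          (ds.foldl (pvDfsStep t) (rem, stack, comp)).2.1
          (ds.foldl (pvDfsStep t) (rem, stack, comp)).2.2 ∧
        t ∉ (ds.foldl (pvDfsStep t) (rem, stack, comp)).2.1 ∧
        t ∈ (ds.foldl (pvDfsStep t) (rem, stack, comp)).2.2 ∧
        (ds.foldl (pvDfsStep t) (rem, stack, comp)).1.Sublist rem ∧
        (∀ x ∈ comp, x ∈ (ds.foldl (pvDfsStep t) (rem, stack, comp)).2.2) ∧
        (∀ d ∈ ds, (t.1 + d.1, t.2 + d.2) ∉ (ds.foldl (pvDfsStep t) (rem, stack, comp)).1) := by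
  intro ds
  induction ds with
  | nil =>
    intro rem stack comp _ inv htc hts
    simp only [List.foldl_nil]
    exact ⟨inv, hts, htc, List.Sublist.refl _, fun x hx => hx, by simp⟩
  | cons d ds ih =>
    intro rem stack comp hds inv htc hts
    simp only [List.foldl_cons]
    by_cases hmem : PySem.Set.contains rem (t.1 + d.1, t.2 + d.2)
    · have hnr : (t.1 + d.1, t.2 + d.2) ∈ rem := by simpa [PySem.Set.contains] using hmem
      have hstep : pvDfsStep t (rem, stack, comp) d
          = (rem.erase (t.1 + d.1, t.2 + d.2), stack ++ [(t.1 + d.1, t.2 + d.2)],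
              comp ++ [(t.1 + d.1, t.2 + d.2)]) := by
        simp [pvDfsStep]
        exact hnr
      rw [hstep]
      have hnc : (t.1 + d.1, t.2 + d.2) ∉ comp := fun h => inv.disj _ h hnr
      have hns : (t.1 + d.1, t.2 + d.2) ∉ stack := fun h => hnc (inv.ssub _ h)
      have hnt : (t.1 + d.1, t.2 + d.2) ≠ t := fun h => hnc (by rw [h]; exact htc)
      have hnV : (t.1 + d.1, t.2 + d.2) ∈ V := (inv.cover _).2 (Or.inr hnr)
      have inv' : PvDfsPre V s t (rem.erase (t.1 + d.1, t.2 + d.2))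
          (stack ++ [(t.1 + d.1, t.2 + d.2)]) (comp ++ [(t.1 + d.1, t.2 + d.2)]) := by
        refine ⟨inv.nr.erase _, ?_, ?_, ?_, ?_, ?_, List.mem_append_left _ inv.hs, ?_, ?_⟩
        · rw [List.nodup_append]
          refine ⟨inv.nc, List.nodup_singleton _, ?_⟩
          intro a ha b hb hab
          simp only [List.mem_singleton] at hb
          subst hb
          subst hab
          exact hnc ha
        · rw [List.nodup_append]
          refine ⟨inv.ns, List.nodup_singleton _, ?_⟩
          intro a ha b hb hab
          simp only [List.mem_singleton] at hb
          subst hb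
          subst hab
          exact hns ha
        · intro x hx
          rcases List.mem_append.1 hx with hx | hx
          · exact fun h => inv.disj x hx (List.mem_of_mem_erase h)
          · simp at hx
            subst hx
            intro h
            exact absurd ((inv.nr.mem_erase_iff).1 h).1 (by simp)
        · intro x
          rw [inv.cover x, List.mem_append, inv.nr.mem_erase_iff]
          by_cases hxn : x = (t.1 + d.1, t.2 + d.2)
          · subst hxn; simp [hnr]
          · simp [hxn]
        · intro x hx
          rcases List.mem_append.1 hx with hx | hx
          · exact List.mem_append_left _ (inv.ssub x hx)
          · exact List.mem_append_right _ hx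
        · intro x hx
          rcases List.mem_append.1 hx with hx | hx
          · exact inv.conn x hx
          · simp at hx
            subst hx
            refine Relation.ReflTransGen.tail (inv.conn t htc) ⟨hnV, ?_⟩
            rw [pvAdj_iff_dir]
            exact ⟨d, hds d List.mem_cons_self, rfl⟩
        · intro x hx hxs hxt y hy hadj
          rcases List.mem_append.1 hx with hx | hx
          · exact List.mem_append_left _
              (inv.closed x hx (fun h => hxs (List.mem_append_left _ h)) hxt y hy hadj)
          · exact absurd (List.mem_append_right _ hx) hxs
      have hnil : t ∉ stack ++ [(t.1 + d.1, t.2 + d.2)] := by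
        intro h
        rcases List.mem_append.1 h with h | h
        · exact hts h
        · simp at h; exact hnt h.symm
      obtain ⟨jinv, jts, jtc, jsub, jmono, jnb⟩ :=
        ih _ _ _ (fun e he => hds e (List.mem_cons_of_mem _ he)) inv'
          (List.mem_append_left _ htc) hnil
      refine ⟨jinv, jts, jtc, jsub.trans List.erase_sublist, ?_, ?_⟩
      · intro x hx
        exact jmono x (List.mem_append_left _ hx)
      · intro e he
        rcases List.mem_cons.1 he with rfl | he'
        · intro hin
          have := jsub.mem hin
          exact absurd ((inv.nr.mem_erase_iff).1 this).1 (by simp)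
        · exact jnb e he'
    · have hnr' : (t.1 + d.1, t.2 + d.2) ∉ rem := by simpa [PySem.Set.contains] using hmem
      have hstep : pvDfsStep t (rem, stack, comp) d = (rem, stack, comp) := by
        simp [pvDfsStep]
        exact hnr'
      rw [hstep]
      obtain ⟨jinv, jts, jtc, jsub, jmono, jnb⟩ :=
        ih _ _ _ (fun e he => hds e (List.mem_cons_of_mem _ he)) inv htc hts
      refine ⟨jinv, jts, jtc, jsub, jmono, ?_⟩
      intro e he
      rcases List.mem_cons.1 he with rfl | he'
      · intro hin
        exact hnr' (jsub.mem hin)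
      · exact jnb e he' 

structure PvDfsInv (V : List (Int × Int)) (s : Int × Int)
    (rem stack comp : List (Int × Int)) : Prop where
  nr : rem.Nodup
  nc : comp.Nodup
  ns : stack.Nodup
  disj : ∀ x ∈ comp, x ∉ rem
  cover : ∀ x, x ∈ V ↔ x ∈ comp ∨ x ∈ rem
  ssub : ∀ x ∈ stack, x ∈ comp
  hs : s ∈ comp
  conn : ∀ x ∈ comp, PvConn V s x
  closed : ∀ x ∈ comp, x ∉ stack → ∀ y ∈ V, PvAdj x y → y ∈ comp

set_option maxHeartbeats 1000000 in
theorem pvDfs_spec {V : List (Int × Int)} {s : Int × Int} :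
    ∀ rem stack comp, PvDfsInv V s rem stack comp →
      (∀ x, x ∈ (pvDfs rem stack comp).1 ↔ x ∈ V ∧ PvConn V s x) ∧
        (pvDfs rem stack comp).2.Sublist rem ∧
        (∀ x, x ∈ (pvDfs rem stack comp).2 ↔ x ∈ V ∧ ¬ PvConn V s x) ∧
        (pvDfs rem stack comp).2.Nodup := by
  intro rem stack comp
  fun_induction pvDfs rem stack comp with
  | case1 rem comp =>
    intro inv
    have hcl : ∀ z ∈ comp, ∀ y ∈ V, PvAdj z y → y ∈ comp :=
      fun z hz => inv.closed z hz (by simp)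
    refine ⟨?_, List.Sublist.refl _, ?_, inv.nr⟩
    · intro x
      exact ⟨fun hx => ⟨(inv.cover x).2 (Or.inl hx), inv.conn x hx⟩,
        fun ⟨_, hc⟩ => pvClosed_conn hcl inv.hs hc⟩
    · intro x
      constructor
      · intro hx
        refine ⟨(inv.cover x).2 (Or.inr hx), fun hc => ?_⟩
        exact inv.disj x (pvClosed_conn hcl inv.hs hc) hx
      · rintro ⟨hxV, hnc⟩
        rcases (inv.cover x).1 hxV with hx | hx
        · exact absurd (inv.conn x hx) hnc
        · exact hx
  | case2 rem stack comp h t s' ih =>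
    intro inv
    have hsd : stack.dropLast ++ [stack.getLast h] = stack := List.dropLast_append_getLast h
    have htds : stack.getLast h ∉ stack.dropLast := by
      have hns := inv.ns
      rw [← hsd, List.nodup_append] at hns
      intro hm
      exact hns.2.2 _ hm _ (by simp) rfl
    have pre : PvDfsPre V s (stack.getLast h) rem stack.dropLast comp := by
      refine ⟨inv.nr, inv.nc, (List.dropLast_sublist stack).nodup inv.ns, inv.disj, inv.cover,
        fun x hx => inv.ssub x ((List.dropLast_sublist stack).subset hx), inv.hs, inv.conn, ?_⟩
      intro x hx hxs hxt y hy hadj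
      refine inv.closed x hx ?_ y hy hadj
      intro hxst
      rcases List.mem_append.1 (hsd ▸ hxst) with hmm | hmm
      · exact hxs hmm
      · simp at hmm; exact hxt hmm
    obtain ⟨jinv, jts, jtc, jsub, jmono, jnb⟩ :=
      pvDfs_fold pvDirs rem stack.dropLast comp (fun d hd => hd) pre
        (inv.ssub _ (List.getLast_mem h)) htds
    have inv2 : PvDfsInv V s s'.1 s'.2.1 s'.2.2 := by
      refine ⟨jinv.nr, jinv.nc, jinv.ns, jinv.disj, jinv.cover, jinv.ssub, jinv.hs, jinv.conn, ?_⟩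
      intro x hx hxs y hy hadj
      by_cases hxt : x = stack.getLast h
      · subst hxt
        rw [pvAdj_iff_dir] at hadj
        obtain ⟨d, hd, rfl⟩ := hadj
        rcases (jinv.cover _).1 hy with hc | hr
        · exact hc
        · exact absurd hr (jnb d hd)
      · exact jinv.closed x hx hxs hxt y hy hadj
    obtain ⟨m1, m2, m3, m4⟩ := ih inv2
    exact ⟨m1, m2.trans jsub, m3, m4⟩

-- ---------- assembling the keep sets ----------

theorem pvSkip_fold {out : List (Int × Int)} {s m : Int × Int}
    (hmin : ∀ x, x ∈ out → PvConn out s x →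
      PySem.List.min2? (pvClosure out [x] [x]) (fun rc => rc.1) (fun rc => -rc.2) = some m) :
    ∀ (rest R' : List (Int × Int)) (k : List (Int × Int)), R'.Sublist rest → rest.Nodup →
      (∀ x ∈ rest, x ∈ out) → (∀ x ∈ rest, x ∉ R' → PvConn out s x) → m ∈ k →
      rest.foldl (fun keep t => pvAddMin keep (pvClosure out [t] [t])) k
        = R'.foldl (fun keep t => pvAddMin keep (pvClosure out [t] [t])) k := by
  intro rest R' k hsub
  induction hsub generalizing k with
  | slnil => intro _ _ _ _; rfl
  | @cons l₁ l₂ a hsub ih =>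
    intro hnd hsubout hconn hm
    have hal₂ : a ∉ l₂ := (List.nodup_cons.1 hnd).1
    have hal₁ : a ∉ l₁ := fun h => hal₂ (hsub.subset h)
    have hconn_a : PvConn out s a := hconn a List.mem_cons_self hal₁
    have hstep : pvAddMin k (pvClosure out [a] [a]) = k := by
      unfold pvAddMin
      rw [hmin a (hsubout a List.mem_cons_self) hconn_a]
      exact pvSet_add_of_mem hm
    simp only [List.foldl_cons, hstep]
    exact ih k (List.nodup_cons.1 hnd).2 (fun x hx => hsubout x (List.mem_cons_of_mem _ hx))
      (fun x hx hx' => hconn x (List.mem_cons_of_mem _ hx) hx') hm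
  | @cons₂ l₁ l₂ a hsub ih =>
    intro hnd hsubout hconn hm
    have hal₂ : a ∉ l₂ := (List.nodup_cons.1 hnd).1
    simp only [List.foldl_cons]
    refine ih _ (List.nodup_cons.1 hnd).2 (fun x hx => hsubout x (List.mem_cons_of_mem _ hx))
      ?_ (pvAddMin_mem hm)
    intro x hx hx'
    refine hconn x (List.mem_cons_of_mem _ hx) ?_
    intro hxal
    rcases List.mem_cons.1 hxal with rfl | hxl
    · exact hal₂ hx
    · exact hx' hxl

theorem pvKeep_eq {out : List (Int × Int)} (hout : out.Nodup) :
    ∀ (R : List (Int × Int)) (acc : List (Int × Int)), R.Sublist out →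
      (∀ x ∈ R, ∀ y, y ∈ out → PvConn out x y → y ∈ R) →
      (pvComps R).foldl pvAddMin acc
        = R.foldl (fun keep t => pvAddMin keep (pvClosure out [t] [t])) acc := by
  suffices H : ∀ (n : Nat) (R acc : List (Int × Int)), R.length ≤ n → R.Sublist out →
      (∀ x ∈ R, ∀ y, y ∈ out → PvConn out x y → y ∈ R) →
      (pvComps R).foldl pvAddMin acc
        = R.foldl (fun keep t => pvAddMin keep (pvClosure out [t] [t])) acc by
    exact fun R acc => H R.length R acc le_rfl
  intro n
  induction n with
  | zero =>
    intro R acc hlen _ _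
    have : R = [] := List.length_eq_zero_iff.1 (Nat.le_zero.1 hlen)
    subst this
    simp [pvComps]
  | succ n ihn =>
    intro R acc hlen hsub hclosed
    rcases R with _ | ⟨s, rest⟩
    · simp [pvComps]
    · have hRn : (s :: rest).Nodup := hsub.nodup hout
      have hsout : s ∈ out := hsub.subset List.mem_cons_self
      have hsR : s ∈ s :: rest := List.mem_cons_self
      have dinv : PvDfsInv (s :: rest) s rest [s] [s] := by
        refine ⟨(List.nodup_cons.1 hRn).2, List.nodup_singleton _, List.nodup_singleton _,
          ?_, ?_, fun x hx => hx, List.mem_singleton.2 rfl, ?_, ?_⟩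
        · intro x hx
          simp only [List.mem_singleton] at hx
          subst hx
          exact (List.nodup_cons.1 hRn).1
        · intro x; simp [List.mem_cons]
        · intro x hx
          simp only [List.mem_singleton] at hx
          subst hx
          exact Relation.ReflTransGen.refl
        · intro x hx hxs
          exact absurd hx hxs
      obtain ⟨cmem, rsub, rmem, rnodup⟩ := pvDfs_spec rest [s] [s] dinv
      have hres := pvConn_restrict (fun x hx => hsub.subset hx) hclosed hsR
      have clinv : PvClInv out s [s] [s] := by
        refine ⟨List.nodup_singleton _, List.mem_singleton.2 rfl, ?_, fun x hx => hx, ?_, ?_⟩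
        · intro x hx
          simp only [List.mem_singleton] at hx
          subst hx
          exact hsout
        · intro x hx
          simp only [List.mem_singleton] at hx
          subst hx
          exact Relation.ReflTransGen.refl
        · intro x hx hxs
          exact absurd hx hxs
      obtain ⟨bmem, _⟩ := pvClosure_spec [s] [s] clinv
      have hmemeq : ∀ x, x ∈ (pvDfs rest [s] [s]).1 ↔ x ∈ pvClosure out [s] [s] := by
        intro x
        rw [cmem x, bmem x]
        constructor
        · rintro ⟨hxR, hc⟩
          exact ⟨hsub.subset hxR, (hres x).1 hc⟩
        · rintro ⟨hxo, hc⟩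
          exact ⟨hclosed s hsR x hxo hc, (hres x).2 hc⟩
      have hsC : s ∈ (pvDfs rest [s] [s]).1 := (cmem s).2 ⟨hsR, Relation.ReflTransGen.refl⟩
      have hCne : (pvDfs rest [s] [s]).1 ≠ [] := List.ne_nil_of_mem hsC
      have hBne : pvClosure out [s] [s] ≠ [] :=
        List.ne_nil_of_mem ((bmem s).2 ⟨hsout, Relation.ReflTransGen.refl⟩)
      obtain ⟨m, hm_eq, hm_mem, hm_min⟩ := pvMin2_spec (pvClosure out [s] [s]) hBne
      -- every tile connected to s has the same closure minimum m
      have hminall : ∀ x, x ∈ out → PvConn out s x →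
          PySem.List.min2? (pvClosure out [x] [x]) (fun rc => rc.1) (fun rc => -rc.2)
            = some m := by
        intro x hxo hcx
        have clinvx : PvClInv out x [x] [x] := by
          refine ⟨List.nodup_singleton _, List.mem_singleton.2 rfl, ?_, fun z hz => hz, ?_, ?_⟩
          · intro z hz
            simp only [List.mem_singleton] at hz
            subst hz
            exact hxo
          · intro z hz
            simp only [List.mem_singleton] at hz
            subst hz
            exact Relation.ReflTransGen.refl
          · intro z hz hzs
            exact absurd hz hzs
        obtain ⟨bmemx, _⟩ := pvClosure_spec [x] [x] clinvx
        have hxs : PvConn out x s := pvConn_symm hsout hcx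
        have hiffx : ∀ y, y ∈ pvClosure out [x] [x] ↔ y ∈ pvClosure out [s] [s] := by
          intro y
          rw [bmemx y, bmem y]
          exact ⟨fun ⟨hyo, hc⟩ => ⟨hyo, pvConn_trans hcx hc⟩,
            fun ⟨hyo, hc⟩ => ⟨hyo, pvConn_trans hxs hc⟩⟩
        have hxne : pvClosure out [x] [x] ≠ [] :=
          List.ne_nil_of_mem ((bmemx x).2 ⟨hxo, Relation.ReflTransGen.refl⟩)
        rw [pvMin2_congr hxne hiffx]
        exact hm_eq
      -- peel off the head on both sides
      have hcompseq : pvComps (s :: rest)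
          = (pvDfs rest [s] [s]).1 :: pvComps (pvDfs rest [s] [s]).2 := by
        rw [pvComps]
      rw [hcompseq]
      simp only [List.foldl_cons]
      have hhead : pvAddMin acc (pvDfs rest [s] [s]).1 = pvAddMin acc (pvClosure out [s] [s]) := by
        unfold pvAddMin
        rw [pvMin2_congr hCne hmemeq]
      rw [hhead]
      have hmk : m ∈ pvAddMin acc (pvClosure out [s] [s]) := by
        unfold pvAddMin
        rw [hm_eq]
        exact (PySem.Set.mem_add _ _ _).2 (Or.inr rfl)
      -- classmates of s that were consumed by the DFS may be skipped on the B side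
      have hskip := pvSkip_fold hminall rest (pvDfs rest [s] [s]).2
        (pvAddMin acc (pvClosure out [s] [s])) rsub (List.nodup_cons.1 hRn).2
        (fun x hx => hsub.subset (List.mem_cons_of_mem _ hx)) ?_ hmk
      · rw [hskip]
        -- recurse on the remainder
        refine ihn (pvDfs rest [s] [s]).2 _ ?_ ?_ ?_
        · have := rsub.length_le
          simp only [List.length_cons] at hlen
          omega
        · exact (rsub.trans (List.sublist_cons_self _ _)).trans hsub
        · intro x hx y hyo hcy
          obtain ⟨hxR, hnconn⟩ := (rmem x).1 hx
          refine (rmem y).2 ⟨hclosed x hxR y hyo hcy, ?_⟩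
          intro hcsy
          refine hnconn ((hres x).2 ?_)
          have hxo : x ∈ out := hsub.subset hxR
          exact pvConn_trans ((hres y).1 hcsy) (pvConn_symm hxo hcy)
      · intro x hx hxnr
        have hxR : x ∈ s :: rest := List.mem_cons_of_mem _ hx
        by_cases hcs : PvConn (s :: rest) s x
        · exact (hres x).1 hcs
        · exact absurd ((rmem x).2 ⟨hxR, hcs⟩) hxnr


-- ===== VERDICT (by name: the statement is the Claim_ definition above) =====
theorem transform_tiles_py_spec : Claim_equal_transform_tiles_py := by
  intro tiles mode dr dc _
  unfold Spec_transform_tiles_py transform_tiles_py transform_tiles_py_alt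
  by_cases hraw : mode == "raw"
  · have : mode = "raw" := by simpa using hraw
    subst this
    simp
  · simp only [hraw, if_false, Bool.false_eq_true]
    by_cases hcn : mode == "comp_ne"
    · simp only [hcn, if_true]
      have hnodup : (pvOut tiles dr dc).Nodup := PySem.Set.nodup_ofList _
      exact pvKeep_eq hnodup (pvOut tiles dr dc) [] (List.Sublist.refl _)
        (fun x _ y hy _ => hy)
    · simp [hcn]
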